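-- pv_equiv track=rewrite | github.com/jessiethw/aoc2023 | solutions/day7.py | find_replace
-- ===== SOURCE A (Python) =====
-- def find_replace(string, joker=False):
--     if joker: v = 'P'
--     else: v='D'
--
--     pairs = [('K','B'), ('Q','C'), ('J', v), ('T','E'),
--              ('9','F'), ('8','G'), ('7','H'), ('6','I'),
--              ('5','L'), ('4','M'), ('3','N'), ('2','O'),
--             ]
--     for i,j in pairs:
--         string = string.replace(i, j)
--
--     return string
-- ===== SOURCE B (Python) =====
-- def find_replace(string, joker=False):
--     mapping = {'K': 'B', 'Q': 'C', 'J': 'P' if joker else 'D', 'T': 'E',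
--                '9': 'F', '8': 'G', '7': 'H', '6': 'I',
--                '5': 'L', '4': 'M', '3': 'N', '2': 'O'}
--     return ''.join(mapping.get(c, c) for c in string)
-- ===== Notes on version B (the rewrite author's own statement) =====
-- stated objective: idiomatic
-- what changed: Replaces the 12 sequential str.replace full scans with a lookup table built once and a single pass over the string joining mapping.get(c, c) per character.
import Mathlib
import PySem

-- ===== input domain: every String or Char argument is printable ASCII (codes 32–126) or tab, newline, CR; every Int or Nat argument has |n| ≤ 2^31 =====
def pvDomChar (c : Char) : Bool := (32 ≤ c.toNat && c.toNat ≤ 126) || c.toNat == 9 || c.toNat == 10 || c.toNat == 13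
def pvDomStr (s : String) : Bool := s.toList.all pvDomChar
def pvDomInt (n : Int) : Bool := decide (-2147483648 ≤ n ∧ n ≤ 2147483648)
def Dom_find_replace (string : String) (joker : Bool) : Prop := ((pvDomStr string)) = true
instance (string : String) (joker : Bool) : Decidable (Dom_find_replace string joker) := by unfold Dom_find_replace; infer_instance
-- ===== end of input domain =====

-- B replaces A's 12 sequential str.replace scans by a lookup table built once and a single
-- pass over the string (idiomatic; same result since source and target characters are disjoint).

-- ===== PORT A =====
def find_replace (string : String) (joker : Bool) : String :=
  let v : String := if joker then "P" else "D"
  let pairs : List (String × String) :=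
    [("K","B"), ("Q","C"), ("J", v), ("T","E"),
     ("9","F"), ("8","G"), ("7","H"), ("6","I"),
     ("5","L"), ("4","M"), ("3","N"), ("2","O")]
  pairs.foldl (fun s p => PySem.Str.replace s p.1 p.2) string

-- ===== PORT B =====
def find_replace_alt (string : String) (joker : Bool) : String :=
  let mapping : PySem.Dict Char Char := PySem.Dict.ofList
    [('K','B'), ('Q','C'), ('J', if joker then 'P' else 'D'), ('T','E'),
     ('9','F'), ('8','G'), ('7','H'), ('6','I'),
     ('5','L'), ('4','M'), ('3','N'), ('2','O')]
  String.ofList (string.toList.map (fun c => mapping.getD c c))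

-- ===== PRECONDITION & SPEC =====
def Spec_find_replace (string : String) (joker : Bool) (out : String) : Prop := out = find_replace_alt string joker
instance (string : String) (joker : Bool) (out : String) : Decidable (Spec_find_replace string joker out) := by unfold Spec_find_replace; infer_instance

-- ===== CLAIM (what is proved, stated in full; the proofs are below) =====
def Claim_equal_find_replace : Prop := ∀ (string : String) (joker : Bool), Dom_find_replace string joker → Spec_find_replace string joker (find_replace string joker)

-- ===== LEMMAS AND PROOFS =====

-- a one-character replace is a character map
theorem replace_go_single (a b : Char) :
    ∀ (fuel : Nat) (l acc : List Char), l.length ≤ fuel →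
      PySem.Chars.replace.go [a] [b] fuel l acc =
        acc.reverse ++ l.map (fun c => if c = a then b else c) := by
  intro fuel
  induction fuel with
  | zero =>
    intro l acc h
    cases l with
    | nil => simp [PySem.Chars.replace.go]
    | cons c t => simp at h
  | succ n ih =>
    intro l acc h
    cases l with
    | nil => simp [PySem.Chars.replace.go]
    | cons c t =>
      by_cases hc : c = a
      · subst hc
        rw [PySem.Chars.replace.go]
        rw [if_pos (by simp [List.isPrefixOf])]
        simp only [List.length_cons, List.length_nil, List.drop_succ_cons, List.drop_zero]
        rw [ih t ([b].reverse ++ acc) (by simpa using Nat.le_of_succ_le_succ h)]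
        simp
      · rw [PySem.Chars.replace.go]
        rw [if_neg (by simp [List.isPrefixOf]; exact fun h' => (hc h'.symm).elim)]
        rw [ih t (c :: acc) (by simpa using Nat.le_of_succ_le_succ h)]
        simp [hc]

theorem replace_single (a b : Char) (l : List Char) :
    PySem.Chars.replace l [a] [b] = l.map (fun c => if c = a then b else c) := by
  rw [PySem.Chars.replace]
  rw [if_neg (by simp)]
  exact replace_go_single a b l.length l [] (le_refl _)

-- sequential lookup in an association list, first match wins
def pvLookup (ps : List (Char × Char)) (c : Char) : Char :=
  match ps with
  | [] => c
  | (a, b) :: t => if c = a then b else pvLookup t c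

def pvPairs (joker : Bool) : List (Char × Char) :=
  [('K','B'), ('Q','C'), ('J', if joker then 'P' else 'D'), ('T','E'),
   ('9','F'), ('8','G'), ('7','H'), ('6','I'),
   ('5','L'), ('4','M'), ('3','N'), ('2','O')]

-- appending one more replacement pair to the lookup commutes with applying it afterwards,
-- provided the new source character is not a target of the earlier pairs
theorem lookup_step (a b : Char) (ps : List (Char × Char))
    (hb : ∀ p ∈ ps, p.2 ≠ a) (c : Char) :
    (if pvLookup ps c = a then b else pvLookup ps c) = pvLookup (ps ++ [(a, b)]) c := by
  induction ps with
  | nil => rfl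
  | cons p t ih =>
    obtain ⟨x, y⟩ := p
    simp only [pvLookup, List.cons_append]
    by_cases h : c = x
    · simp [h, hb (x, y) (List.mem_cons_self)]
    · simp only [if_neg h]
      exact ih (fun q hq => hb q (List.mem_cons_of_mem _ hq))

-- mapping one more single-character replacement over an already-mapped list
theorem map_map_step {f g g' : Char → Char} (h : ∀ c, f (g c) = g' c) :
    ∀ l : List Char, List.map f (List.map g l) = List.map g' l := by
  intro l
  induction l with
  | nil => rfl
  | cons c t ih => simp only [List.map_cons]; rw [h c, ih]

def pvMapping (joker : Bool) : PySem.Dict Char Char := PySem.Dict.ofList (pvPairs joker)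

theorem pvMapping_items (joker : Bool) : (pvMapping joker).items = pvPairs joker := by
  cases joker <;> decide

-- B's dictionary lookup is the sequential lookup in the same pairs
theorem getD_mapping (joker : Bool) (c : Char) :
    (pvMapping joker).getD c c = pvLookup (pvPairs joker) c := by
  by_cases h1 : c = 'K'; · cases joker <;> (subst h1; decide)
  by_cases h2 : c = 'Q'; · cases joker <;> (subst h2; decide)
  by_cases h3 : c = 'J'; · cases joker <;> (subst h3; decide)
  by_cases h4 : c = 'T'; · cases joker <;> (subst h4; decide)
  by_cases h5 : c = '9'; · cases joker <;> (subst h5; decide)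
  by_cases h6 : c = '8'; · cases joker <;> (subst h6; decide)
  by_cases h7 : c = '7'; · cases joker <;> (subst h7; decide)
  by_cases h8 : c = '6'; · cases joker <;> (subst h8; decide)
  by_cases h9 : c = '5'; · cases joker <;> (subst h9; decide)
  by_cases h10 : c = '4'; · cases joker <;> (subst h10; decide)
  by_cases h11 : c = '3'; · cases joker <;> (subst h11; decide)
  by_cases h12 : c = '2'; · cases joker <;> (subst h12; decide)
  have e1 : ('K' == c) = false := beq_eq_false_iff_ne.mpr (fun h => h1 (Eq.symm h))
  have e2 : ('Q' == c) = false := beq_eq_false_iff_ne.mpr (fun h => h2 (Eq.symm h))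
  have e3 : ('J' == c) = false := beq_eq_false_iff_ne.mpr (fun h => h3 (Eq.symm h))
  have e4 : ('T' == c) = false := beq_eq_false_iff_ne.mpr (fun h => h4 (Eq.symm h))
  have e5 : ('9' == c) = false := beq_eq_false_iff_ne.mpr (fun h => h5 (Eq.symm h))
  have e6 : ('8' == c) = false := beq_eq_false_iff_ne.mpr (fun h => h6 (Eq.symm h))
  have e7 : ('7' == c) = false := beq_eq_false_iff_ne.mpr (fun h => h7 (Eq.symm h))
  have e8 : ('6' == c) = false := beq_eq_false_iff_ne.mpr (fun h => h8 (Eq.symm h))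
  have e9 : ('5' == c) = false := beq_eq_false_iff_ne.mpr (fun h => h9 (Eq.symm h))
  have e10 : ('4' == c) = false := beq_eq_false_iff_ne.mpr (fun h => h10 (Eq.symm h))
  have e11 : ('3' == c) = false := beq_eq_false_iff_ne.mpr (fun h => h11 (Eq.symm h))
  have e12 : ('2' == c) = false := beq_eq_false_iff_ne.mpr (fun h => h12 (Eq.symm h))
  simp only [PySem.Dict.getD, PySem.Dict.get?, pvMapping_items, pvPairs, pvLookup,
    List.find?_cons, e1, e2, e3, e4, e5, e6, e7, e8, e9, e10, e11, e12,
    if_neg h1, if_neg h2, if_neg h3, if_neg h4, if_neg h5, if_neg h6,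
    if_neg h7, if_neg h8, if_neg h9, if_neg h10, if_neg h11, if_neg h12]
  rfl

-- ===== VERDICT (by name: the statement is the Claim_ definition above) =====
theorem find_replace_spec : Claim_equal_find_replace := by
  intro string joker _hdom
  unfold Spec_find_replace find_replace find_replace_alt
  rw [← String.toList_inj]
  simp only [List.foldl_cons, List.foldl_nil, PySem.Str.toList_replace, String.toList_ofList]
  have hv : (if joker = true then ("P" : String) else "D").toList = [if joker = true then 'P' else 'D'] := by
    cases joker <;> rfl
  rw [hv]
  simp only [show ("K" : String).toList = ['K'] from rfl, show ("B" : String).toList = ['B'] from rfl,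
    show ("Q" : String).toList = ['Q'] from rfl, show ("C" : String).toList = ['C'] from rfl,
    show ("J" : String).toList = ['J'] from rfl, show ("T" : String).toList = ['T'] from rfl,
    show ("E" : String).toList = ['E'] from rfl, show ("9" : String).toList = ['9'] from rfl,
    show ("F" : String).toList = ['F'] from rfl, show ("8" : String).toList = ['8'] from rfl,
    show ("G" : String).toList = ['G'] from rfl, show ("7" : String).toList = ['7'] from rfl,
    show ("H" : String).toList = ['H'] from rfl, show ("6" : String).toList = ['6'] from rfl,
    show ("I" : String).toList = ['I'] from rfl, show ("5" : String).toList = ['5'] from rfl,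
    show ("L" : String).toList = ['L'] from rfl, show ("4" : String).toList = ['4'] from rfl,
    show ("M" : String).toList = ['M'] from rfl, show ("3" : String).toList = ['3'] from rfl,
    show ("N" : String).toList = ['N'] from rfl, show ("2" : String).toList = ['2'] from rfl,
    show ("O" : String).toList = ['O'] from rfl]
  simp only [replace_single]
  rw [show (fun c => if c = 'K' then 'B' else c) = pvLookup [('K','B')] from
    funext (fun c => by simp [pvLookup])]
  rw [map_map_step (f := fun c => if c = 'Q' then 'C' else c)
    (g := pvLookup [('K', 'B')])
    (g' := pvLookup [('K', 'B'), ('Q', 'C')])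
    (fun c => lookup_step 'Q' 'C' [('K', 'B')] (by cases joker <;> decide) c)]
  rw [map_map_step (f := fun c => if c = 'J' then (if joker = true then 'P' else 'D') else c)
    (g := pvLookup [('K', 'B'), ('Q', 'C')])
    (g' := pvLookup [('K', 'B'), ('Q', 'C'), ('J', (if joker = true then 'P' else 'D'))])
    (fun c => lookup_step 'J' (if joker = true then 'P' else 'D') [('K', 'B'), ('Q', 'C')] (by cases joker <;> decide) c)]
  rw [map_map_step (f := fun c => if c = 'T' then 'E' else c)
    (g := pvLookup [('K', 'B'), ('Q', 'C'), ('J', (if joker = true then 'P' else 'D'))])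
    (g' := pvLookup [('K', 'B'), ('Q', 'C'), ('J', (if joker = true then 'P' else 'D')), ('T', 'E')])
    (fun c => lookup_step 'T' 'E' [('K', 'B'), ('Q', 'C'), ('J', (if joker = true then 'P' else 'D'))] (by cases joker <;> decide) c)]
  rw [map_map_step (f := fun c => if c = '9' then 'F' else c)
    (g := pvLookup [('K', 'B'), ('Q', 'C'), ('J', (if joker = true then 'P' else 'D')), ('T', 'E')])
    (g' := pvLookup [('K', 'B'), ('Q', 'C'), ('J', (if joker = true then 'P' else 'D')), ('T', 'E'), ('9', 'F')])
    (fun c => lookup_step '9' 'F' [('K', 'B'), ('Q', 'C'), ('J', (if joker = true then 'P' else 'D')), ('T', 'E')] (by cases joker <;> decide) c)]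
  rw [map_map_step (f := fun c => if c = '8' then 'G' else c)
    (g := pvLookup [('K', 'B'), ('Q', 'C'), ('J', (if joker = true then 'P' else 'D')), ('T', 'E'), ('9', 'F')])
    (g' := pvLookup [('K', 'B'), ('Q', 'C'), ('J', (if joker = true then 'P' else 'D')), ('T', 'E'), ('9', 'F'), ('8', 'G')])
    (fun c => lookup_step '8' 'G' [('K', 'B'), ('Q', 'C'), ('J', (if joker = true then 'P' else 'D')), ('T', 'E'), ('9', 'F')] (by cases joker <;> decide) c)]
  rw [map_map_step (f := fun c => if c = '7' then 'H' else c)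
    (g := pvLookup [('K', 'B'), ('Q', 'C'), ('J', (if joker = true then 'P' else 'D')), ('T', 'E'), ('9', 'F'), ('8', 'G')])
    (g' := pvLookup [('K', 'B'), ('Q', 'C'), ('J', (if joker = true then 'P' else 'D')), ('T', 'E'), ('9', 'F'), ('8', 'G'), ('7', 'H')])
    (fun c => lookup_step '7' 'H' [('K', 'B'), ('Q', 'C'), ('J', (if joker = true then 'P' else 'D')), ('T', 'E'), ('9', 'F'), ('8', 'G')] (by cases joker <;> decide) c)]
  rw [map_map_step (f := fun c => if c = '6' then 'I' else c)
    (g := pvLookup [('K', 'B'), ('Q', 'C'), ('J', (if joker = true then 'P' else 'D')), ('T', 'E'), ('9', 'F'), ('8', 'G'), ('7', 'H')])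
    (g' := pvLookup [('K', 'B'), ('Q', 'C'), ('J', (if joker = true then 'P' else 'D')), ('T', 'E'), ('9', 'F'), ('8', 'G'), ('7', 'H'), ('6', 'I')])
    (fun c => lookup_step '6' 'I' [('K', 'B'), ('Q', 'C'), ('J', (if joker = true then 'P' else 'D')), ('T', 'E'), ('9', 'F'), ('8', 'G'), ('7', 'H')] (by cases joker <;> decide) c)]
  rw [map_map_step (f := fun c => if c = '5' then 'L' else c)
    (g := pvLookup [('K', 'B'), ('Q', 'C'), ('J', (if joker = true then 'P' else 'D')), ('T', 'E'), ('9', 'F'), ('8', 'G'), ('7', 'H'), ('6', 'I')])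
    (g' := pvLookup [('K', 'B'), ('Q', 'C'), ('J', (if joker = true then 'P' else 'D')), ('T', 'E'), ('9', 'F'), ('8', 'G'), ('7', 'H'), ('6', 'I'), ('5', 'L')])
    (fun c => lookup_step '5' 'L' [('K', 'B'), ('Q', 'C'), ('J', (if joker = true then 'P' else 'D')), ('T', 'E'), ('9', 'F'), ('8', 'G'), ('7', 'H'), ('6', 'I')] (by cases joker <;> decide) c)]
  rw [map_map_step (f := fun c => if c = '4' then 'M' else c)
    (g := pvLookup [('K', 'B'), ('Q', 'C'), ('J', (if joker = true then 'P' else 'D')), ('T', 'E'), ('9', 'F'), ('8', 'G'), ('7', 'H'), ('6', 'I'), ('5', 'L')])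
    (g' := pvLookup [('K', 'B'), ('Q', 'C'), ('J', (if joker = true then 'P' else 'D')), ('T', 'E'), ('9', 'F'), ('8', 'G'), ('7', 'H'), ('6', 'I'), ('5', 'L'), ('4', 'M')])
    (fun c => lookup_step '4' 'M' [('K', 'B'), ('Q', 'C'), ('J', (if joker = true then 'P' else 'D')), ('T', 'E'), ('9', 'F'), ('8', 'G'), ('7', 'H'), ('6', 'I'), ('5', 'L')] (by cases joker <;> decide) c)]
  rw [map_map_step (f := fun c => if c = '3' then 'N' else c)
    (g := pvLookup [('K', 'B'), ('Q', 'C'), ('J', (if joker = true then 'P' else 'D')), ('T', 'E'), ('9', 'F'), ('8', 'G'), ('7', 'H'), ('6', 'I'), ('5', 'L'), ('4', 'M')])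
    (g' := pvLookup [('K', 'B'), ('Q', 'C'), ('J', (if joker = true then 'P' else 'D')), ('T', 'E'), ('9', 'F'), ('8', 'G'), ('7', 'H'), ('6', 'I'), ('5', 'L'), ('4', 'M'), ('3', 'N')])
    (fun c => lookup_step '3' 'N' [('K', 'B'), ('Q', 'C'), ('J', (if joker = true then 'P' else 'D')), ('T', 'E'), ('9', 'F'), ('8', 'G'), ('7', 'H'), ('6', 'I'), ('5', 'L'), ('4', 'M')] (by cases joker <;> decide) c)]
  rw [map_map_step (f := fun c => if c = '2' then 'O' else c)
    (g := pvLookup [('K', 'B'), ('Q', 'C'), ('J', (if joker = true then 'P' else 'D')), ('T', 'E'), ('9', 'F'), ('8', 'G'), ('7', 'H'), ('6', 'I'), ('5', 'L'), ('4', 'M'), ('3', 'N')])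
    (g' := pvLookup [('K', 'B'), ('Q', 'C'), ('J', (if joker = true then 'P' else 'D')), ('T', 'E'), ('9', 'F'), ('8', 'G'), ('7', 'H'), ('6', 'I'), ('5', 'L'), ('4', 'M'), ('3', 'N'), ('2', 'O')])
    (fun c => lookup_step '2' 'O' [('K', 'B'), ('Q', 'C'), ('J', (if joker = true then 'P' else 'D')), ('T', 'E'), ('9', 'F'), ('8', 'G'), ('7', 'H'), ('6', 'I'), ('5', 'L'), ('4', 'M'), ('3', 'N')] (by cases joker <;> decide) c)]
  apply List.map_congr_left
  intro c _
  exact (getD_mapping joker c).symm
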